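-- pv_equiv track=rewrite | github.com/Hithru/IEEEXtreme | HackerRank/ProblemSolving/StrongPassword.py | minimum_characters_needed
-- ===== SOURCE A (Python) =====
-- def minimum_characters_needed(password: str) -> int:
--     numbers = "0123456789"
--     lower_case = "abcdefghijklmnopqrstuvwxyz"
--     upper_case = "ABCDEFGHIJKLMNOPQRSTUVWXYZ"
--     special_characters = "!@#$%^&*()-+"
--
--     characters_needed = 4
--     upper_case_needed = True
--     lower_case_needed = True
--     special_character_needed = True
--     number_needed = True
--     for c in password:
--         if upper_case_needed and c in upper_case:
--             characters_needed -= 1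
--             upper_case_needed = False
--         if lower_case_needed and c in lower_case:
--             characters_needed -= 1
--             lower_case_needed = False
--         if special_character_needed and c in special_characters:
--             characters_needed -= 1
--             special_character_needed = False
--         if number_needed and c in numbers:
--             characters_needed -= 1
--             number_needed = False
--
--     if len(password) < 6 and 6 - len(password) > characters_needed:
--         characters_needed = 6 - len(password)
--     return characters_needed
-- ===== SOURCE B (Python) =====
-- def minimum_characters_needed(password: str) -> int:
--     classes = ["0123456789",
--                "abcdefghijklmnopqrstuvwxyz",
--                "ABCDEFGHIJKLMNOPQRSTUVWXYZ",
--                "!@#$%^&*()-+"]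
--     present = sum(1 for cs in classes if any(c in cs for c in password))
--     return max(4 - present, 6 - len(password))
-- ===== Notes on version B (the rewrite author's own statement) =====
-- stated objective: simpler
-- what changed: Replaces the stateful single pass with four boolean flags and a conditional final patch-up by per-class presence scans combined into a closed-form max(4 - present, 6 - len).
import Mathlib
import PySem

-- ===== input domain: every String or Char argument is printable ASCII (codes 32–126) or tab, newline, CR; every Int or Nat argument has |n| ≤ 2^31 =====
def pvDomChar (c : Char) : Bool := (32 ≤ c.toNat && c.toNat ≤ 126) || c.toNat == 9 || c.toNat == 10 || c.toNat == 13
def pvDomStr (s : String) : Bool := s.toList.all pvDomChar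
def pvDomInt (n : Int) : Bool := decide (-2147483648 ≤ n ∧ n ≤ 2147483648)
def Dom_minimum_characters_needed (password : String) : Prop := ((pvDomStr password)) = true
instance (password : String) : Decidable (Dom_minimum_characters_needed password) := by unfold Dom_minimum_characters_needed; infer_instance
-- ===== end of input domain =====

-- B replaces A's single stateful pass (four flags, conditional final patch-up) by independent
-- per-class presence scans combined as max(4 - present, 6 - len): simpler decomposition, same cost.

-- ===== PORT A =====
def pvNumbers : List Char := "0123456789".toList
def pvLower : List Char := "abcdefghijklmnopqrstuvwxyz".toList
def pvUpper : List Char := "ABCDEFGHIJKLMNOPQRSTUVWXYZ".toList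
def pvSpecial : List Char := "!@#$%^&*()-+".toList

-- one iteration of A's loop over state (characters_needed, upper_needed, lower_needed, special_needed, number_needed)
def pvStep (st : Int × Bool × Bool × Bool × Bool) (c : Char) : Int × Bool × Bool × Bool × Bool :=
  let (n, u, lo, sp, nu) := st
  let (n, u) := if u && pvUpper.contains c then (n - 1, false) else (n, u)
  let (n, lo) := if lo && pvLower.contains c then (n - 1, false) else (n, lo)
  let (n, sp) := if sp && pvSpecial.contains c then (n - 1, false) else (n, sp)
  let (n, nu) := if nu && pvNumbers.contains c then (n - 1, false) else (n, nu)
  (n, u, lo, sp, nu)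

def minimum_characters_needed (password : String) : Int :=
  let st := password.toList.foldl pvStep (4, true, true, true, true)
  let n := st.1
  let len : Int := password.toList.length
  if len < 6 ∧ 6 - len > n then 6 - len else n

-- ===== PORT B =====
def pvClasses : List (List Char) := [pvNumbers, pvLower, pvUpper, pvSpecial]

def minimum_characters_needed_alt (password : String) : Int :=
  let present : Int :=
    (pvClasses.filter (fun cs => password.toList.any cs.contains)).length
  max (4 - present) (6 - (password.toList.length : Int))

-- ===== PRECONDITION & SPEC =====
def Spec_minimum_characters_needed (password : String) (out : Int) : Prop := out = minimum_characters_needed_alt password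
instance (password : String) (out : Int) : Decidable (Spec_minimum_characters_needed password out) := by unfold Spec_minimum_characters_needed; infer_instance

-- ===== CLAIM (what is proved, stated in full; the proofs are below) =====
def Claim_equal_minimum_characters_needed : Prop := ∀ (password : String), Dom_minimum_characters_needed password → Spec_minimum_characters_needed password (minimum_characters_needed password)

-- ===== LEMMAS AND PROOFS =====

-- pvHas cls l: some character of l lies in class cls; pvHit/pvMiss: the 0/1 decrement A's loop
-- takes for one class at the head character / over a whole suffix, given the class's flag
def pvHas (cls l : List Char) : Bool := l.any cls.contains
def pvHit (flag : Bool) (cls : List Char) (c : Char) : Int := if flag && cls.contains c then 1 else 0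
def pvMiss (flag : Bool) (cls l : List Char) : Int := if flag && pvHas cls l then 1 else 0

theorem pvHas_cons (cls : List Char) (c : Char) (t : List Char) :
    pvHas cls (c :: t) = (cls.contains c || pvHas cls t) := by
  simp [pvHas]

theorem pvMiss_cons (flag : Bool) (cls : List Char) (c : Char) (t : List Char) :
    pvMiss flag cls (c :: t) = pvHit flag cls c + pvMiss (flag && !cls.contains c) cls t := by
  unfold pvMiss pvHit
  rw [pvHas_cons]
  by_cases h : cls.contains c = true
  · simp only [h]; cases flag <;> simp
  · simp only [Bool.not_eq_true] at h
    simp only [h]; cases flag <;> simp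

theorem pvFlag_cons (flag : Bool) (cls : List Char) (c : Char) (t : List Char) :
    ((flag && !cls.contains c) && !pvHas cls t) = (flag && !pvHas cls (c :: t)) := by
  rw [pvHas_cons]
  cases flag <;> cases h : cls.contains c <;> simp

-- one step of A's loop, written with pvHit
theorem pvStep_eq (n : Int) (u lo sp nu : Bool) (c : Char) :
    pvStep (n, u, lo, sp, nu) c =
      (n - pvHit u pvUpper c - pvHit lo pvLower c - pvHit sp pvSpecial c - pvHit nu pvNumbers c,
       u && !pvUpper.contains c, lo && !pvLower.contains c,
       sp && !pvSpecial.contains c, nu && !pvNumbers.contains c) := by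
  unfold pvStep pvHit
  generalize pvUpper.contains c = cu
  generalize pvLower.contains c = cl
  generalize pvSpecial.contains c = cs
  generalize pvNumbers.contains c = cn
  cases cu <;> cases cl <;> cases cs <;> cases cn <;>
    cases u <;> cases lo <;> cases sp <;> cases nu <;> simp

-- characterisation of A's fold: flags record absence, the counter drops once per class seen
theorem pvFold_char (l : List Char) (n : Int) (u lo sp nu : Bool) :
    l.foldl pvStep (n, u, lo, sp, nu) =
      (n - pvMiss u pvUpper l - pvMiss lo pvLower l - pvMiss sp pvSpecial l - pvMiss nu pvNumbers l,
       u && !pvHas pvUpper l, lo && !pvHas pvLower l,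
       sp && !pvHas pvSpecial l, nu && !pvHas pvNumbers l) := by
  induction l generalizing n u lo sp nu with
  | nil => simp [pvMiss, pvHas]
  | cons c t ih =>
    rw [List.foldl_cons, pvStep_eq, ih]
    rw [pvMiss_cons u pvUpper c t, pvMiss_cons lo pvLower c t,
        pvMiss_cons sp pvSpecial c t, pvMiss_cons nu pvNumbers c t,
        pvFlag_cons u pvUpper c t, pvFlag_cons lo pvLower c t,
        pvFlag_cons sp pvSpecial c t, pvFlag_cons nu pvNumbers c t]
    refine congrArg (fun m => (m, _, _, _, _)) ?_
    ring

theorem pvMiss_true (cls l : List Char) :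
    pvMiss true cls l = (if pvHas cls l = true then 1 else 0) := by
  simp [pvMiss]

-- B's present-count, spelled out as one 0/1 term per class
theorem pvPresent (l : List Char) :
    (((pvClasses.filter (fun cs => l.any cs.contains)).length : Int)) =
      (if pvHas pvNumbers l = true then 1 else 0) + (if pvHas pvLower l = true then 1 else 0)
        + (if pvHas pvUpper l = true then 1 else 0) + (if pvHas pvSpecial l = true then 1 else 0) := by
  by_cases hN : l.any pvNumbers.contains = true <;>
    by_cases hL : l.any pvLower.contains = true <;>
    by_cases hU : l.any pvUpper.contains = true <;>
    by_cases hS : l.any pvSpecial.contains = true <;>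
    simp [pvClasses, pvHas, hN, hL, hU, hS]

-- ===== VERDICT (by name: the statement is the Claim_ definition above) =====
theorem minimum_characters_needed_spec : Claim_equal_minimum_characters_needed := by
  intro password _
  unfold Spec_minimum_characters_needed minimum_characters_needed minimum_characters_needed_alt
  rw [pvFold_char, pvPresent, pvMiss_true, pvMiss_true, pvMiss_true, pvMiss_true]
  simp only [max_def]
  split_ifs <;> omega
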